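-- pv_equiv track=rewrite | github.com/Mithunpalanisamy1202/Medical-no-show-prediction | flask-project/hello.py | index1
-- ===== SOURCE A (Python) =====
-- def index1(l1):
--     categories = ['Gender', 'Age', 'Hypertension', 'Diabetes', 'Alcoholism', 'Handicap', 'Scheduleday', 'Appoinmentday', 'Cliniclocation']
--     l2=[]
--
--     for i in range(0,len(l1)):
--         for j in range(0,len(categories)):
--             if l1[i]==j:
--                 l2.append(categories[j])
--             else:
--                 pass
--     return l2
-- ===== SOURCE B (Python) =====
-- def index1(l1):
--     categories = ['Gender', 'Age', 'Hypertension', 'Diabetes', 'Alcoholism', 'Handicap', 'Scheduleday', 'Appoinmentday', 'Cliniclocation']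
--     return [categories[x] for x in l1 if 0 <= x < len(categories)]
-- ===== Notes on version B (the rewrite author's own statement) =====
-- stated objective: idiomatic
-- what changed: Replaces A's nested equality-search loop (scanning all 9 category indices for each element) with a single list comprehension that does an arithmetic range test and direct random-access indexing categories[x].
import Mathlib
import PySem

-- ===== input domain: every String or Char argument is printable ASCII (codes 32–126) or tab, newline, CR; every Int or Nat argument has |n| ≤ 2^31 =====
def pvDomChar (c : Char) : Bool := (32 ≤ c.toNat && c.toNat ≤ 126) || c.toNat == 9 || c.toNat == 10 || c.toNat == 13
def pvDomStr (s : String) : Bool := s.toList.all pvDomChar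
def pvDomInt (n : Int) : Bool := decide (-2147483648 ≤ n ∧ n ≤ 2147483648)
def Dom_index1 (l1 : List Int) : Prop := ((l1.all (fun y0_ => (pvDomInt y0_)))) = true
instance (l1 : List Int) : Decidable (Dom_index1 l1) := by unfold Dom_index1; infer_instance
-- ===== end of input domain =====

-- B replaces A's nested equality-search loop with one comprehension: a range test and direct indexing (idiomatic).

-- ===== PORT A =====
def index1Cats : List String :=
  ["Gender", "Age", "Hypertension", "Diabetes", "Alcoholism", "Handicap", "Scheduleday", "Appoinmentday", "Cliniclocation"]

def index1 (l1 : List Int) : List String :=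
  (PySem.List.pyRange 0 (l1.length : Int) 1).foldl
    (fun l2 i =>
      (PySem.List.pyRange 0 (index1Cats.length : Int) 1).foldl
        (fun l2 j =>
          if PySem.List.pyGetD l1 i 0 = j then l2 ++ [PySem.List.pyGetD index1Cats j ""] else l2)
        l2)
    []

-- ===== PORT B =====
def index1_alt (l1 : List Int) : List String :=
  (l1.filter (fun x => decide (0 ≤ x ∧ x < (index1Cats.length : Int)))).map
    (fun x => PySem.List.pyGetD index1Cats x "")

-- ===== PRECONDITION & SPEC =====
def Spec_index1 (l1 : List Int) (out : List String) : Prop := out = index1_alt l1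
instance (l1 : List Int) (out : List String) : Decidable (Spec_index1 l1 out) := by unfold Spec_index1; infer_instance

-- ===== CLAIM (what is proved, stated in full; the proofs are below) =====
def Claim_equal_index1 : Prop := ∀ (l1 : List Int), Dom_index1 l1 → Spec_index1 l1 (index1 l1)

-- ===== LEMMAS AND PROOFS =====

-- A's inner scan over the 9 category indices appends categories[x] iff 0 ≤ x < 9.
lemma index1_inner_eq (x : Int) (l2 : List String) :
    (PySem.List.pyRange 0 (index1Cats.length : Int) 1).foldl
      (fun l2 j => if x = j then l2 ++ [PySem.List.pyGetD index1Cats j ""] else l2) l2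
    = (if 0 ≤ x ∧ x < (index1Cats.length : Int) then l2 ++ [PySem.List.pyGetD index1Cats x ""] else l2) := by
  have h : (PySem.List.pyRange 0 (index1Cats.length : Int) 1) = [0,1,2,3,4,5,6,7,8] := by decide
  rw [h]
  by_cases hx : 0 ≤ x ∧ x < (index1Cats.length : Int)
  · rw [if_pos hx]
    obtain ⟨h1, h2⟩ := hx
    have h9 : x < 9 := by simpa [index1Cats] using h2
    interval_cases x <;> rfl
  · rw [if_neg hx]
    have h9 : ¬ (0 ≤ x ∧ x < 9) := by simpa [index1Cats] using hx
    simp only [List.foldl]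
    rw [if_neg (by omega), if_neg (by omega), if_neg (by omega), if_neg (by omega),
        if_neg (by omega), if_neg (by omega), if_neg (by omega), if_neg (by omega), if_neg (by omega)]

theorem index1_eq_alt (l1 : List Int) : index1 l1 = index1_alt l1 := by
  unfold index1 index1_alt
  rw [PySem.List.foldl_pyRange_zero_pyGetD' l1 0
    (fun l2 x =>
      (PySem.List.pyRange 0 (index1Cats.length : Int) 1).foldl
        (fun l2 j => if x = j then l2 ++ [PySem.List.pyGetD index1Cats j ""] else l2) l2) []]
  have hf : (fun (l2 : List String) (x : Int) =>
      (PySem.List.pyRange 0 (index1Cats.length : Int) 1).foldl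
        (fun l2 j => if x = j then l2 ++ [PySem.List.pyGetD index1Cats j ""] else l2) l2)
      = (fun (l2 : List String) (x : Int) =>
          if decide (0 ≤ x ∧ x < (index1Cats.length : Int)) = true
          then l2 ++ [PySem.List.pyGetD index1Cats x ""] else l2) := by
    funext l2 x
    rw [index1_inner_eq x l2]
    by_cases hx : 0 ≤ x ∧ x < (index1Cats.length : Int) <;> simp [hx]
  rw [hf, PySem.List.foldl_append_if]
  simp

-- ===== VERDICT (by name: the statement is the Claim_ definition above) =====
theorem index1_spec : Claim_equal_index1 := by
  intro l1 _
  exact index1_eq_alt l1
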